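-- pv_equiv track=rewrite | github.com/kesava1234567890/DSA0318-NATURAL-LANGUAGE-PROCESSING | 11.top down parse tree.py | parse
-- ===== SOURCE A (Python) =====
-- def parse(tokens, grammar, symbol):
--     if not tokens:
--         return False, []
--     if symbol not in grammar:
--         if tokens[0] == symbol:
--             return True, tokens[1:]
--         else:
--             return False, tokens
--     for production in grammar[symbol]:
--         remaining_tokens = tokens
--         success = True
--         for sym in production:
--             success, remaining_tokens = parse(remaining_tokens, grammar, sym)
--             if not success:
--                 break
--
--
--         if success:
--             return True, remaining_tokens
--
--     return False, tokens
-- ===== SOURCE B (Python) =====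
-- def parse(tokens, grammar, symbol):
--     # Packrat variant: memoize sub-parse results keyed on (remaining length, symbol),
--     # so each (position, nonterminal) pair is expanded at most once.
--     memo = {}
--
--     def run(rem, sym):
--         if not rem:
--             return False, []
--         if sym not in grammar:
--             if rem[0] == sym:
--                 return True, rem[1:]
--             return False, rem
--         key = (len(rem), sym)
--         hit = memo.get(key)
--         if hit is not None:
--             return hit
--         for production in grammar[sym]:
--             remaining = rem
--             ok = True
--             for s in production:
--                 ok, remaining = run(remaining, s)
--                 if not ok:
--                     break
--             if ok:
--                 memo[key] = (True, remaining)
--                 return True, remaining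
--         memo[key] = (False, rem)
--         return False, rem
--
--     return run(tokens, symbol)
-- ===== Notes on version B (the rewrite author's own statement) =====
-- stated objective: alternative
-- what changed: Added packrat memoization to the descent: one memo entry per (remaining-token count, nonterminal) so each sub-parse is computed at most once, replacing A's repeated re-expansion of the same nonterminal at the same position.
-- outside the precondition, e.g. on parse(['a'], {'S': [[]]}, 'S'): A returns (True, ['a']), B returns (True, ['a'])
import Mathlib
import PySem

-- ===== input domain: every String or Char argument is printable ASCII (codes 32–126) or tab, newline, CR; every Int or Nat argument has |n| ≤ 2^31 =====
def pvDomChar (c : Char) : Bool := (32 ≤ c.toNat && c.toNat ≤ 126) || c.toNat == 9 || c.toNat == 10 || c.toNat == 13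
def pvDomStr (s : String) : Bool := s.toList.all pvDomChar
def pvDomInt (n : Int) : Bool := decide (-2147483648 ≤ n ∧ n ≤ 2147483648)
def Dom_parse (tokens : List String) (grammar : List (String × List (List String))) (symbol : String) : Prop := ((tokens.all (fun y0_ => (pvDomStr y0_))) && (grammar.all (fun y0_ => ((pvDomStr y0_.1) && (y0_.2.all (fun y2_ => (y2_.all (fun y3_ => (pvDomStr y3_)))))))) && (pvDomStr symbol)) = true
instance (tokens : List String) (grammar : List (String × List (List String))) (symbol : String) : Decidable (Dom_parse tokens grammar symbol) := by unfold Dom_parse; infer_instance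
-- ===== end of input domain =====

-- B adds packrat memoization (one memo entry per (remaining-length, nonterminal)) to the
-- recursive descent; equivalence is proved on grammars whose reachable part is free of
-- left recursion and of ε-productions (outside that, A's recursion may not terminate).

-- ===== PORT A =====
-- A's inner 'for sym in production' loop (threads the remaining tokens, breaks on failure)
def seqW (f : List String → String → Bool × List String) : List String → List String → Bool × List String
  | toks, [] => (true, toks)
  | toks, s :: ss =>
    let r := f toks s
    if r.1 then seqW f r.2 ss else (false, r.2)

-- A's outer 'for production in grammar[symbol]' loop
def tryW (f : List String → String → Bool × List String) (toks : List String) : List (List String) → Bool × List String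
  | [] => (false, toks)
  | p :: ps =>
    let r := seqW f toks p
    if r.1 then (true, r.2) else tryW f toks ps

-- fuel only makes the recursion total; it never runs out under Pre_parse
def parseF : Nat → List String → List (String × List (List String)) → String → Bool × List String
  | 0, toks, _, _ => (false, toks)
  | fuel + 1, toks, g, sym =>
    if toks.isEmpty then (false, [])
    else
      match g.lookup sym with
      | none => if toks.getD 0 "" = sym then (true, toks.drop 1) else (false, toks)
      | some prods => tryW (fun t s => parseF fuel t g s) toks prods

def parse (tokens : List String) (grammar : List (String × List (List String))) (symbol : String) : Bool × List String :=
  parseF ((tokens.length + 2) * (grammar.length + 2)) tokens grammar symbol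

-- ===== PORT B =====
-- B's inner 'for s in production' loop, threading the memo through every sub-call
def seqB (f : List ((Nat × String) × (Bool × List String)) → List String → String → (Bool × List String) × List ((Nat × String) × (Bool × List String))) :
    List ((Nat × String) × (Bool × List String)) → List String → List String → (Bool × List String) × List ((Nat × String) × (Bool × List String))
  | m, toks, [] => ((true, toks), m)
  | m, toks, s :: ss =>
    let r := f m toks s
    if r.1.1 then seqB f r.2 r.1.2 ss else ((false, r.1.2), r.2)

-- B's 'for production in grammar[sym]' loop, threading the memo
def tryB (f : List ((Nat × String) × (Bool × List String)) → List String → String → (Bool × List String) × List ((Nat × String) × (Bool × List String)))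
    (toks : List String) :
    List ((Nat × String) × (Bool × List String)) → List (List String) → (Bool × List String) × List ((Nat × String) × (Bool × List String))
  | m, [] => ((false, toks), m)
  | m, p :: ps =>
    let r := seqB f m toks p
    if r.1.1 then ((true, r.1.2), r.2) else tryB f toks r.2 ps

-- Source B's 'run': recursive descent with a memo dict keyed on (len(remaining), symbol);
-- the dict only ever gains fresh keys, kept as a cons'd association list
def pAltF : Nat → List (String × List (List String)) → List ((Nat × String) × (Bool × List String)) → List String → String → (Bool × List String) × List ((Nat × String) × (Bool × List String))
  | 0, _, m, toks, _ => ((false, toks), m)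
  | fuel + 1, g, m, toks, sym =>
    if toks.isEmpty then ((false, []), m)
    else
      match g.lookup sym with
      | none => if toks.getD 0 "" = sym then ((true, toks.drop 1), m) else ((false, toks), m)
      | some prods =>
        match m.lookup (toks.length, sym) with
        | some v => (v, m)
        | none =>
          let r := tryB (fun m' t s => pAltF fuel g m' t s) toks m prods
          (r.1, ((toks.length, sym), r.1) :: r.2)

def parse_alt (tokens : List String) (grammar : List (String × List (List String))) (symbol : String) : Bool × List String :=
  (pAltF ((tokens.length + 2) * (grammar.length + 2)) grammar [] tokens symbol).1

-- ===== PRECONDITION & SPEC =====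
def pvProds (g : List (String × List (List String))) (s : String) : List (List String) :=
  (g.lookup s).getD []

-- one closure step of the call-reachability set
def pvStepC (g : List (String × List (List String))) (S : List String) : List String :=
  (S ++ S.flatMap (fun s => (pvProds g s).flatMap id)).dedup

def pvIterC (g : List (String × List (List String))) : Nat → List String → List String
  | 0, S => S
  | t + 1, S => pvIterC g t (pvStepC g S)

def pvReachC (g : List (String × List (List String))) (symbol : String) : List String :=
  pvIterC g ((g.flatMap (fun kp => kp.2.flatMap id)).length + 1) [symbol]

def pvClosed (g : List (String × List (List String))) (C : List String) : Bool :=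
  C.all (fun s => ((pvProds g s).flatMap id).all (fun x => C.contains x))

-- every production nonempty, and the chain of first symbols reaches a terminal within d steps
def pvChase (g : List (String × List (List String))) : Nat → String → Bool
  | 0, s => (g.lookup s).isNone
  | d + 1, s =>
    match g.lookup s with
    | none => true
    | some ps => ps.all (fun p => match p with | [] => false | h :: _ => pvChase g d h)

-- Pre_ excludes inputs whose grammar part reachable from `symbol` has an ε-production or a
-- left-recursive (first-symbol) cycle — the classic conditions under which A's recursive
-- descent can recurse without bound (RecursionError); on the excluded grammars where the
-- offending rule is never dynamically exercised A still returns, and B returns the same value.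
def Pre_parse (tokens : List String) (grammar : List (String × List (List String))) (symbol : String) : Prop :=
  (let C := pvReachC grammar symbol
   C.contains symbol && pvClosed grammar C && C.all (fun s => pvChase grammar (grammar.length + 1) s)) = true

instance (tokens : List String) (grammar : List (String × List (List String))) (symbol : String) : Decidable (Pre_parse tokens grammar symbol) := by unfold Pre_parse; infer_instance

def pvWitness_parse : List String × (List (String × List (List String))) × String :=
  (["a"], [("S", [["a"]])], "S")

def Spec_parse (tokens : List String) (grammar : List (String × List (List String))) (symbol : String) (out : Bool × List String) : Prop := out = parse_alt tokens grammar symbol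
instance (tokens : List String) (grammar : List (String × List (List String))) (symbol : String) (out : Bool × List String) : Decidable (Spec_parse tokens grammar symbol out) := by unfold Spec_parse; infer_instance

-- ===== CLAIM (what is proved, stated in full; the proofs are below) =====
def Claim_equal_parse : Prop := ∀ (tokens : List String) (grammar : List (String × List (List String))) (symbol : String), Dom_parse tokens grammar symbol → Pre_parse tokens grammar symbol → Spec_parse tokens grammar symbol (parse tokens grammar symbol)

-- ===== LEMMAS AND PROOFS =====

-- membership from association-list lookup
theorem pvLookupMem {A B : Type} [BEq A] [LawfulBEq A] : ∀ (l : List (A × B)) (k : A) (v : B), l.lookup k = some v → (k, v) ∈ l := by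
  intro l
  induction l with
  | nil => intro k v h; simp [List.lookup] at h
  | cons e t ih =>
    intro k v h
    rw [List.lookup] at h
    by_cases hk : k == e.1
    · simp only [hk] at h
      have : k = e.1 := eq_of_beq hk
      cases h
      rw [this]
      exact List.mem_cons_self
    · simp only [hk] at h
      right
      exact ih k v h

theorem pvChasePos (g : List (String × List (List String))) (d : Nat) (s : String) (ps : List (List String)) (hl : g.lookup s = some ps) (hc : pvChase g d s = true) : ∃ d', d = d' + 1 := by
  cases d with
  | zero => simp [pvChase, hl] at hc
  | succ d' => exact ⟨d', rfl⟩

theorem pvChaseKey (g : List (String × List (List String))) (d : Nat) (s : String) (ps : List (List String)) (hl : g.lookup s = some ps) (hc : pvChase g (d + 1) s = true) : ∀ p ∈ ps, ∃ h t, p = h :: t ∧ pvChase g d h = true := by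
  intro p hp
  simp only [pvChase, hl, List.all_eq_true] at hc
  have := hc p hp
  cases p with
  | nil => simp at this
  | cons h t => exact ⟨h, t, rfl, this⟩

theorem pvClosedMem (g : List (String × List (List String))) (C : List String) (hcl : pvClosed g C = true) (s : String) (hs : s ∈ C) (p : List String) (hp : p ∈ pvProds g s) (x : String) (hx : x ∈ p) : x ∈ C := by
  unfold pvClosed at hcl
  rw [List.all_eq_true] at hcl
  have h1 := hcl s hs
  rw [List.all_eq_true] at h1
  have h2 := h1 x (by
    rw [List.mem_flatMap]
    exact ⟨p, hp, by simpa using hx⟩)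
  simpa [List.contains_eq_mem] using h2

theorem pvChaseMem (g : List (String × List (List String))) (C : List String) (hch : C.all (fun s => pvChase g (g.length + 1) s) = true) (s : String) (hs : s ∈ C) : pvChase g (g.length + 1) s = true := by
  rw [List.all_eq_true] at hch
  exact hch s hs

-- success of a sequence of good symbols lands on a later-or-equal suffix
theorem seqW_shape (tokens : List String) (C : List String) (f : List String → String → Bool × List String)
    (Hf : ∀ (a : Nat) (s : String), a ≤ tokens.length → s ∈ C → (f (tokens.drop a) s).1 = true → ∃ j, a < j ∧ j ≤ tokens.length ∧ (f (tokens.drop a) s).2 = tokens.drop j) :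
    ∀ (ss : List String) (a : Nat), a ≤ tokens.length → (∀ s ∈ ss, s ∈ C) →
      (seqW f (tokens.drop a) ss).1 = true →
      ∃ b, a ≤ b ∧ b ≤ tokens.length ∧ (seqW f (tokens.drop a) ss).2 = tokens.drop b := by
  intro ss
  induction ss with
  | nil => intro a ha _ _; exact ⟨a, le_refl a, ha, rfl⟩
  | cons s ss ih =>
    intro a ha hmem hsucc
    simp only [seqW] at hsucc ⊢
    by_cases hr : (f (tokens.drop a) s).1 = true
    · obtain ⟨j, haj, hjn, hr2⟩ := Hf a s ha (hmem s (by simp)) hr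
      rw [hr2] at hsucc ⊢
      simp only [hr, if_true] at hsucc ⊢
      obtain ⟨b, hjb, hbn, he⟩ := ih j hjn (fun x hx => hmem x (by simp [hx])) hsucc
      exact ⟨b, by omega, hbn, he⟩
    · simp only [Bool.not_eq_true] at hr
      simp [hr] at hsucc

-- success of the production loop consumes at least one token
theorem tryW_shape (tokens : List String) (C : List String) (f : List String → String → Bool × List String)
    (Hf : ∀ (a : Nat) (s : String), a ≤ tokens.length → s ∈ C → (f (tokens.drop a) s).1 = true → ∃ j, a < j ∧ j ≤ tokens.length ∧ (f (tokens.drop a) s).2 = tokens.drop j) :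
    ∀ (ps : List (List String)) (a : Nat), a ≤ tokens.length → (∀ p ∈ ps, p ≠ [] ∧ ∀ s ∈ p, s ∈ C) →
      (tryW f (tokens.drop a) ps).1 = true →
      ∃ j, a < j ∧ j ≤ tokens.length ∧ (tryW f (tokens.drop a) ps).2 = tokens.drop j := by
  intro ps
  induction ps with
  | nil => intro a _ _ h; simp [tryW] at h
  | cons p ps ih =>
    intro a ha hps hsucc
    simp only [tryW] at hsucc ⊢
    by_cases hseq : (seqW f (tokens.drop a) p).1 = true
    · simp only [hseq, if_true] at hsucc ⊢
      obtain ⟨hne, hmem⟩ := hps p (by simp)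
      cases p with
      | nil => exact absurd rfl hne
      | cons s t =>
        simp only [seqW] at hseq ⊢
        by_cases hr : (f (tokens.drop a) s).1 = true
        · obtain ⟨j, haj, hjn, hr2⟩ := Hf a s ha (hmem s (by simp)) hr
          rw [hr2] at hseq ⊢
          simp only [hr, if_true] at hseq ⊢
          obtain ⟨b, hjb, hbn, he⟩ := seqW_shape tokens C f Hf t j hjn (fun x hx => hmem x (by simp [hx])) hseq
          exact ⟨b, by omega, hbn, he⟩
        · simp only [Bool.not_eq_true] at hr
          simp [hr] at hseq
    · simp only [Bool.not_eq_true] at hseq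
      simp only [hseq, Bool.false_eq_true, if_false] at hsucc ⊢
      exact ih a ha (fun q hq => hps q (by simp [hq])) hsucc

-- every successful parse of a reachable symbol consumes at least one token and leaves a suffix
theorem parseF_shape (tokens : List String) (g : List (String × List (List String))) (C : List String)
    (hcl : pvClosed g C = true) (hch : C.all (fun s => pvChase g (g.length + 1) s) = true) :
    ∀ (fuel i : Nat) (sym : String), i ≤ tokens.length → sym ∈ C →
      (parseF fuel (tokens.drop i) g sym).1 = true →
      ∃ j, i < j ∧ j ≤ tokens.length ∧ (parseF fuel (tokens.drop i) g sym).2 = tokens.drop j := by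
  intro fuel
  induction fuel with
  | zero => intro i sym _ _ h; simp [parseF] at h
  | succ fuel ih =>
    intro i sym hi hsym hsucc
    simp only [parseF] at hsucc ⊢
    by_cases hemp : (tokens.drop i).isEmpty = true
    · simp [hemp] at hsucc
    · have hin : i < tokens.length := by
        by_contra hno
        have hdn : tokens.drop i = [] := by rw [List.drop_eq_nil_iff]; omega
        simp [hdn] at hemp
      simp only [Bool.not_eq_true] at hemp
      simp only [hemp, Bool.false_eq_true, if_false] at hsucc ⊢
      cases hl : g.lookup sym with
      | none =>
        simp only [hl] at hsucc ⊢
        by_cases hg : (tokens.drop i).getD 0 "" = sym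
        · simp only [hg, if_true]
          exact ⟨i + 1, by omega, by omega, by rw [List.drop_drop]⟩
        · rw [if_neg hg] at hsucc
          simp at hsucc
      | some ps =>
        simp only [hl] at hsucc ⊢
        have hchs := pvChaseMem g C hch sym hsym
        have hprods : pvProds g sym = ps := by simp [pvProds, hl]
        have hcond : ∀ p ∈ ps, p ≠ [] ∧ ∀ s ∈ p, s ∈ C := by
          intro p hp
          obtain ⟨h, t, rfl, _⟩ := pvChaseKey g g.length sym ps hl hchs p hp
          refine ⟨by simp, ?_⟩
          intro s hs
          exact pvClosedMem g C hcl sym hsym (h :: t) (by rw [hprods]; exact hp) s hs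
        exact tryW_shape tokens C _ (fun a s ha hs h => ih a s ha hs h) ps i (by omega) hcond hsucc

theorem pvBoundLt (n i a gL d : Nat) (hia : i < a) (hin : i < n) :
    (n - a) * (gL + 2) + (gL + 1) < (n - i) * (gL + 2) + d := by
  have h1 : n - a ≤ n - i - 1 := by omega
  have h2 : (n - a) * (gL + 2) ≤ (n - i - 1) * (gL + 2) := Nat.mul_le_mul_right _ h1
  have h3 : (n - i - 1) * (gL + 2) + (gL + 2) = (n - i - 1 + 1) * (gL + 2) := (Nat.succ_mul _ _).symm
  have h4 : n - i - 1 + 1 = n - i := by omega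
  rw [h4] at h3
  omega

theorem seqW_congr2 (tokens : List String) (C : List String) (f₁ f₂ : List String → String → Bool × List String) (lo : Nat)
    (Hsh : ∀ (a : Nat) (s : String), a ≤ tokens.length → s ∈ C → (f₂ (tokens.drop a) s).1 = true → ∃ j, a < j ∧ j ≤ tokens.length ∧ (f₂ (tokens.drop a) s).2 = tokens.drop j)
    (Hc : ∀ (a : Nat) (s : String), lo ≤ a → a ≤ tokens.length → s ∈ C → f₁ (tokens.drop a) s = f₂ (tokens.drop a) s) :
    ∀ (ss : List String) (a : Nat), lo ≤ a → a ≤ tokens.length → (∀ s ∈ ss, s ∈ C) →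
      seqW f₁ (tokens.drop a) ss = seqW f₂ (tokens.drop a) ss := by
  intro ss
  induction ss with
  | nil => intro a _ _ _; rfl
  | cons s ss ih =>
    intro a hlo ha hmem
    have he := Hc a s hlo ha (hmem s (by simp))
    simp only [seqW]
    rw [he]
    by_cases hb : (f₂ (tokens.drop a) s).1 = true
    · simp only [hb, if_true]
      obtain ⟨j, haj, hjn, h2⟩ := Hsh a s ha (hmem s (by simp)) hb
      rw [h2]
      exact ih j (by omega) hjn (fun x hx => hmem x (by simp [hx]))
    · simp only [Bool.not_eq_true] at hb
      simp [hb]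

-- the parse of a reachable symbol does not depend on the fuel once the fuel exceeds the measure
theorem parseF_stable (tokens : List String) (g : List (String × List (List String))) (C : List String)
    (hcl : pvClosed g C = true) (hch : C.all (fun s => pvChase g (g.length + 1) s) = true) :
    ∀ (m : Nat), ∀ (d i : Nat) (sym : String) (fuel₁ fuel₂ : Nat),
      i ≤ tokens.length → sym ∈ C → pvChase g d sym = true →
      (tokens.length - i) * (g.length + 2) + d ≤ m →
      (tokens.length - i) * (g.length + 2) + d + 1 ≤ fuel₁ →
      (tokens.length - i) * (g.length + 2) + d + 1 ≤ fuel₂ →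
      parseF fuel₁ (tokens.drop i) g sym = parseF fuel₂ (tokens.drop i) g sym := by
  intro m
  induction m using Nat.strong_induction_on with
  | _ m ih =>
    intro d i sym fuel₁ fuel₂ hi hsym hchd hm hf1 hf2
    obtain ⟨u, rfl⟩ : ∃ u, fuel₁ = u + 1 := ⟨fuel₁ - 1, by omega⟩
    obtain ⟨v, rfl⟩ : ∃ v, fuel₂ = v + 1 := ⟨fuel₂ - 1, by omega⟩
    simp only [parseF]
    by_cases hemp : (tokens.drop i).isEmpty = true
    · simp [hemp]
    · have hin : i < tokens.length := by
        by_contra hno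
        have hdn : tokens.drop i = [] := by rw [List.drop_eq_nil_iff]; omega
        simp [hdn] at hemp
      simp only [Bool.not_eq_true] at hemp
      simp only [hemp, Bool.false_eq_true, if_false]
      cases hl : g.lookup sym with
      | none => rfl
      | some ps =>
        obtain ⟨d', rfl⟩ := pvChasePos g d sym ps hl hchd
        have Hcall_lo : ∀ (a : Nat) (s : String), i + 1 ≤ a → a ≤ tokens.length → s ∈ C →
            parseF u (tokens.drop a) g s = parseF v (tokens.drop a) g s := by
          intro a s haa han hsC
          have hk : (tokens.length - a) * (g.length + 2) + (g.length + 1) < (tokens.length - i) * (g.length + 2) + (d' + 1) :=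
            pvBoundLt tokens.length i a g.length (d' + 1) (by omega) hin
          exact ih ((tokens.length - a) * (g.length + 2) + (g.length + 1)) (by omega)
            (g.length + 1) a s u v han hsC (pvChaseMem g C hch s hsC) (le_refl _) (by omega) (by omega)
        have Hsh2 : ∀ (a : Nat) (s : String), a ≤ tokens.length → s ∈ C →
            (parseF v (tokens.drop a) g s).1 = true →
            ∃ j, a < j ∧ j ≤ tokens.length ∧ (parseF v (tokens.drop a) g s).2 = tokens.drop j :=
          fun a s ha hs h => parseF_shape tokens g C hcl hch v a s ha hs h
        have hchd' : pvChase g (d' + 1) sym = true := hchd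
        have htry : ∀ (qs : List (List String)), (∀ p ∈ qs, p ∈ ps) →
            tryW (fun t s => parseF u t g s) (tokens.drop i) qs
              = tryW (fun t s => parseF v t g s) (tokens.drop i) qs := by
          intro qs
          induction qs with
          | nil => intro _; rfl
          | cons p qs ihq =>
            intro hsub
            have hpps : p ∈ ps := hsub p (by simp)
            obtain ⟨h, t, rfl, hcd'⟩ := pvChaseKey g d' sym ps hl hchd' p hpps
            have hprods : pvProds g sym = ps := by simp [pvProds, hl]
            have hmemC : ∀ s ∈ h :: t, s ∈ C := by
              intro s hs
              exact pvClosedMem g C hcl sym hsym (h :: t) (by rw [hprods]; exact hpps) s hs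
            have hhC : h ∈ C := hmemC h (by simp)
            have hhead : parseF u (tokens.drop i) g h = parseF v (tokens.drop i) g h := by
              have hklt : (tokens.length - i) * (g.length + 2) + d' < m := by omega
              exact ih ((tokens.length - i) * (g.length + 2) + d') hklt d' i h u v hi hhC hcd'
                (le_refl _) (by omega) (by omega)
            have hseqeq : seqW (fun t' s => parseF u t' g s) (tokens.drop i) (h :: t)
                = seqW (fun t' s => parseF v t' g s) (tokens.drop i) (h :: t) := by
              simp only [seqW]
              rw [hhead]
              by_cases hb : (parseF v (tokens.drop i) g h).1 = true
              · simp only [hb, if_true]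
                obtain ⟨j, hij, hjn, h2⟩ := Hsh2 i h (by omega) hhC hb
                rw [h2]
                exact seqW_congr2 tokens C _ _ (i + 1) Hsh2 Hcall_lo t j (by omega) hjn
                  (fun x hx => hmemC x (by simp [hx]))
              · simp only [Bool.not_eq_true] at hb
                simp [hb]
            simp only [tryW]
            rw [hseqeq]
            by_cases hb : (seqW (fun t' s => parseF v t' g s) (tokens.drop i) (h :: t)).1 = true
            · simp [hb]
            · simp only [Bool.not_eq_true] at hb
              simp only [hb, Bool.false_eq_true, if_false]
              exact ihq (fun q hq => hsub q (by simp [hq]))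
        exact htry ps (fun _ h => h)

theorem pvF0_big (n i gL d : Nat) (hd : d ≤ gL + 1) : (n - i) * (gL + 2) + d + 1 ≤ (n + 2) * (gL + 2) := by
  have h1 : (n - i) * (gL + 2) ≤ n * (gL + 2) := Nat.mul_le_mul_right _ (Nat.sub_le n i)
  have h2 : (n + 2) * (gL + 2) = n * (gL + 2) + (gL + 2) + (gL + 2) := by ring
  omega

-- every memo entry records the (fuel-independent) parse result at its suffix
def MemoInv (tokens : List String) (g : List (String × List (List String))) (memo : List ((Nat × String) × (Bool × List String))) : Prop :=
  ∀ e ∈ memo, e.1.1 ≤ tokens.length ∧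
    e.2 = parseF ((tokens.length + 2) * (g.length + 2)) (tokens.drop (tokens.length - e.1.1)) g e.1.2

theorem seqB_spec (tokens : List String) (C : List String)
    (f₁ : List ((Nat × String) × (Bool × List String)) → List String → String → (Bool × List String) × List ((Nat × String) × (Bool × List String)))
    (f₂ : List String → String → Bool × List String) (lo : Nat)
    (Inv : List ((Nat × String) × (Bool × List String)) → Prop)
    (H : ∀ (a : Nat) (s : String) (mo : List ((Nat × String) × (Bool × List String))), lo ≤ a → a ≤ tokens.length → s ∈ C → Inv mo →
      (f₁ mo (tokens.drop a) s).1 = f₂ (tokens.drop a) s ∧ Inv (f₁ mo (tokens.drop a) s).2)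
    (Hsh : ∀ (a : Nat) (s : String), a ≤ tokens.length → s ∈ C → (f₂ (tokens.drop a) s).1 = true → ∃ j, a < j ∧ j ≤ tokens.length ∧ (f₂ (tokens.drop a) s).2 = tokens.drop j) :
    ∀ (ss : List String) (a : Nat) (mo : List ((Nat × String) × (Bool × List String))), lo ≤ a → a ≤ tokens.length → (∀ s ∈ ss, s ∈ C) → Inv mo →
      (seqB f₁ mo (tokens.drop a) ss).1 = seqW f₂ (tokens.drop a) ss ∧ Inv (seqB f₁ mo (tokens.drop a) ss).2 := by
  intro ss
  induction ss with
  | nil => intro a mo _ _ _ hinv; exact ⟨rfl, hinv⟩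
  | cons s ss ih =>
    intro a mo hlo ha hmem hinv
    obtain ⟨he, hinv'⟩ := H a s mo hlo ha (hmem s (by simp)) hinv
    simp only [seqB, seqW, he]
    by_cases hb : (f₂ (tokens.drop a) s).1 = true
    · simp only [hb, if_true]
      obtain ⟨j, haj, hjn, h2⟩ := Hsh a s ha (hmem s (by simp)) hb
      rw [h2]
      exact ih j _ (by omega) hjn (fun x hx => hmem x (by simp [hx])) hinv'
    · simp only [Bool.not_eq_true] at hb
      simp only [hb, Bool.false_eq_true, if_false]
      exact ⟨trivial, hinv'⟩

-- B's memoized descent computes the same value as A's descent, and preserves the memo invariant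
theorem pAltF_spec (tokens : List String) (g : List (String × List (List String))) (C : List String)
    (hcl : pvClosed g C = true) (hch : C.all (fun s => pvChase g (g.length + 1) s) = true) :
    ∀ (m : Nat), ∀ (d i : Nat) (sym : String) (fuel : Nat) (memo : List ((Nat × String) × (Bool × List String))),
      i ≤ tokens.length → sym ∈ C → pvChase g d sym = true → d ≤ g.length + 1 →
      (tokens.length - i) * (g.length + 2) + d ≤ m →
      (tokens.length - i) * (g.length + 2) + d + 1 ≤ fuel →
      MemoInv tokens g memo →
      (pAltF fuel g memo (tokens.drop i) sym).1
          = parseF ((tokens.length + 2) * (g.length + 2)) (tokens.drop i) g sym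
        ∧ MemoInv tokens g (pAltF fuel g memo (tokens.drop i) sym).2 := by
  intro m
  induction m using Nat.strong_induction_on with
  | _ m ih =>
    intro d i sym fuel memo hi hsym hchd hdle hm hf hinv
    obtain ⟨u, rfl⟩ : ∃ u, fuel = u + 1 := ⟨fuel - 1, by omega⟩
    have hF0 : parseF ((tokens.length + 2) * (g.length + 2)) (tokens.drop i) g sym
        = parseF (u + 1) (tokens.drop i) g sym :=
      parseF_stable tokens g C hcl hch ((tokens.length - i) * (g.length + 2) + d) d i sym _ _
        hi hsym hchd (le_refl _) (pvF0_big tokens.length i g.length d hdle) hf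
    simp only [pAltF]
    by_cases hemp : (tokens.drop i).isEmpty = true
    · rw [hF0]
      simp only [parseF, hemp, if_true]
      exact ⟨trivial, hinv⟩
    · have hin : i < tokens.length := by
        by_contra hno
        have hdn : tokens.drop i = [] := by rw [List.drop_eq_nil_iff]; omega
        simp [hdn] at hemp
      simp only [Bool.not_eq_true] at hemp
      simp only [hemp, Bool.false_eq_true, if_false]
      cases hl : g.lookup sym with
      | none =>
        rw [hF0]
        simp only [parseF, hemp, Bool.false_eq_true, if_false, hl]
        by_cases hg : (tokens.drop i).getD 0 "" = sym
        · simp only [hg, if_true]; exact ⟨trivial, hinv⟩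
        · simp only [hg, if_false]; exact ⟨trivial, hinv⟩
      | some ps =>
        have hlen : (tokens.drop i).length = tokens.length - i := List.length_drop
        cases hmo : memo.lookup ((tokens.drop i).length, sym) with
        | some val =>
          simp only
          have hmem := pvLookupMem memo ((tokens.drop i).length, sym) val hmo
          obtain ⟨_, hval⟩ := hinv _ hmem
          simp only at hval
          rw [hlen] at hval
          have hni : tokens.length - (tokens.length - i) = i := by omega
          rw [hni] at hval
          exact ⟨hval, hinv⟩
        | none =>
          simp only
          obtain ⟨d', rfl⟩ := pvChasePos g d sym ps hl hchd
          have hchd' : pvChase g (d' + 1) sym = true := hchd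
          have hprods : pvProds g sym = ps := by simp [pvProds, hl]
          have Hsh : ∀ (a : Nat) (s : String), a ≤ tokens.length → s ∈ C →
              (parseF u (tokens.drop a) g s).1 = true →
              ∃ j, a < j ∧ j ≤ tokens.length ∧ (parseF u (tokens.drop a) g s).2 = tokens.drop j :=
            fun a s ha hs h => parseF_shape tokens g C hcl hch u a s ha hs h
          have H1 : ∀ (a : Nat) (s : String) (mo : List ((Nat × String) × (Bool × List String))), i + 1 ≤ a → a ≤ tokens.length → s ∈ C → MemoInv tokens g mo →
              (pAltF u g mo (tokens.drop a) s).1 = parseF u (tokens.drop a) g s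
                ∧ MemoInv tokens g (pAltF u g mo (tokens.drop a) s).2 := by
            intro a s mo haa han hsC hmoInv
            have hk : (tokens.length - a) * (g.length + 2) + (g.length + 1) < (tokens.length - i) * (g.length + 2) + (d' + 1) :=
              pvBoundLt tokens.length i a g.length (d' + 1) (by omega) hin
            have hrec := ih ((tokens.length - a) * (g.length + 2) + (g.length + 1)) (by omega)
              (g.length + 1) a s u mo han hsC (pvChaseMem g C hch s hsC) (le_refl _) (le_refl _)
              (by omega) hmoInv
            have hstab : parseF ((tokens.length + 2) * (g.length + 2)) (tokens.drop a) g s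
                = parseF u (tokens.drop a) g s :=
              parseF_stable tokens g C hcl hch ((tokens.length - a) * (g.length + 2) + (g.length + 1))
                (g.length + 1) a s _ _ han hsC (pvChaseMem g C hch s hsC) (le_refl _)
                (pvF0_big tokens.length a g.length (g.length + 1) (le_refl _)) (by omega)
            refine ⟨?_, hrec.2⟩
            rw [hrec.1]
            exact hstab
          have htry : ∀ (qs : List (List String)) (mo : List ((Nat × String) × (Bool × List String))), (∀ p ∈ qs, p ∈ ps) → MemoInv tokens g mo →
              (tryB (fun m' t s => pAltF u g m' t s) (tokens.drop i) mo qs).1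
                = tryW (fun t s => parseF u t g s) (tokens.drop i) qs
              ∧ MemoInv tokens g (tryB (fun m' t s => pAltF u g m' t s) (tokens.drop i) mo qs).2 := by
            intro qs
            induction qs with
            | nil => intro mo _ hmoInv; exact ⟨rfl, hmoInv⟩
            | cons p qs ihq =>
              intro mo hsub hmoInv
              have hpps : p ∈ ps := hsub p (by simp)
              obtain ⟨h, t, rfl, hcd'⟩ := pvChaseKey g d' sym ps hl hchd' p hpps
              have hmemC : ∀ s ∈ h :: t, s ∈ C := by
                intro s hs
                exact pvClosedMem g C hcl sym hsym (h :: t) (by rw [hprods]; exact hpps) s hs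
              have hhC : h ∈ C := hmemC h (by simp)
              have hhead := ih ((tokens.length - i) * (g.length + 2) + d') (by omega) d' i h u mo
                hi hhC hcd' (by omega) (le_refl _) (by omega) hmoInv
              have hstabh : parseF ((tokens.length + 2) * (g.length + 2)) (tokens.drop i) g h
                  = parseF u (tokens.drop i) g h :=
                parseF_stable tokens g C hcl hch ((tokens.length - i) * (g.length + 2) + d')
                  d' i h _ _ hi hhC hcd' (le_refl _)
                  (pvF0_big tokens.length i g.length d' (by omega)) (by omega)
              have hhead1 : (pAltF u g mo (tokens.drop i) h).1 = parseF u (tokens.drop i) g h := by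
                rw [hhead.1, hstabh]
              have hseq : (seqB (fun m' t' s => pAltF u g m' t' s) mo (tokens.drop i) (h :: t)).1
                    = seqW (fun t' s => parseF u t' g s) (tokens.drop i) (h :: t)
                  ∧ MemoInv tokens g (seqB (fun m' t' s => pAltF u g m' t' s) mo (tokens.drop i) (h :: t)).2 := by
                simp only [seqB, seqW, hhead1]
                by_cases hb : (parseF u (tokens.drop i) g h).1 = true
                · simp only [hb, if_true]
                  obtain ⟨j, hij, hjn, h2⟩ := Hsh i h hi hhC hb
                  rw [h2]
                  exact seqB_spec tokens C _ _ (i + 1) (MemoInv tokens g) H1 Hsh t j _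
                    (by omega) hjn (fun x hx => hmemC x (by simp [hx])) hhead.2
                · simp only [Bool.not_eq_true] at hb
                  simp only [hb, Bool.false_eq_true, if_false]
                  exact ⟨trivial, hhead.2⟩
              simp only [tryB, tryW]
              rw [hseq.1]
              by_cases hb : (seqW (fun t' s => parseF u t' g s) (tokens.drop i) (h :: t)).1 = true
              · simp only [hb, if_true]
                exact ⟨trivial, hseq.2⟩
              · simp only [Bool.not_eq_true] at hb
                simp only [hb, Bool.false_eq_true, if_false]
                exact ihq _ (fun q hq => hsub q (by simp [hq])) hseq.2
          have hmain := htry ps memo (fun _ hp => hp) hinv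
          have hres : tryW (fun t s => parseF u t g s) (tokens.drop i) ps
              = parseF ((tokens.length + 2) * (g.length + 2)) (tokens.drop i) g sym := by
            rw [hF0]
            simp [parseF, hemp, hl]
          constructor
          · simp only [hmain.1, hres]
          · intro e he
            rcases List.mem_cons.mp he with rfl | he'
            · constructor
              · simp only [hlen]; omega
              · simp only [hlen]
                have hni : tokens.length - (tokens.length - i) = i := by omega
                rw [hni, hmain.1, hres]
            · exact hmain.2 e he'

-- ===== VERDICT (by name: the statement is the Claim_ definition above) =====
theorem parse_spec : Claim_equal_parse := by
  unfold Claim_equal_parse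
  intro tokens grammar symbol _ hpre
  unfold Spec_parse
  unfold Pre_parse at hpre
  simp only [Bool.and_eq_true] at hpre
  obtain ⟨⟨hcont, hcl⟩, hch⟩ := hpre
  have hsym : symbol ∈ pvReachC grammar symbol := by
    simpa [List.contains_eq_mem] using hcont
  have hmain := pAltF_spec tokens grammar (pvReachC grammar symbol) hcl hch
    ((tokens.length - 0) * (grammar.length + 2) + (grammar.length + 1))
    (grammar.length + 1) 0 symbol ((tokens.length + 2) * (grammar.length + 2)) []
    (by omega) hsym (pvChaseMem grammar (pvReachC grammar symbol) hch symbol hsym)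
    (le_refl _) (le_refl _)
    (pvF0_big tokens.length 0 grammar.length (grammar.length + 1) (le_refl _))
    (by intro e he; simp at he)
  rw [List.drop_zero] at hmain
  unfold parse parse_alt
  exact hmain.1.symm
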